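-- pv_equiv track=rewrite | github.com/alexs2112/MTG-ProxyEngine | Cards.py | two_colour_background
-- ===== SOURCE A (Python) =====
-- def two_colour_background(card):
--   """
--   Checks if all mana symbols in a cards mana cost is either generic or two coloured (such as {R/W})
--   If so, returns true, otherwise false
--
--   RETURNS:
--    - A boolean depending on if the card needs a two coloured background, rather than a gold background
--   """
--   if "mana_cost" not in card:
--     return False
--
--   # First get a list of the cost of the card
--   cost = card["mana_cost"]
--   l = cost[1:-1]
--   l = l.split('}{')
--
--   # Set up a couple other lists
--   colours = ["W", "U", "B", "R", "G"]
--   check = ['B/G', 'B/R', 'G/U', 'G/W', 'R/G', 'R/W', 'U/B', 'U/R', 'W/B', 'W/U']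
--
--   # Make sure there is only one dual colour cost
--   current = ''
--
--   # Iterate over every cost in the cards mana cost. If it is in colours, return False as the border cannot be
--   # two coloured. If there is at least one cost in check that is not in colours, return True
--   hasone = False
--   for c in l:
--     if c in colours:
--       return False
--     if c in check:
--       if current != c and hasone == True:
--         return False
--       hasone = True
--       current = c
--   return hasone
-- ===== SOURCE B (Python) =====
-- def two_colour_background(card):
--   if "mana_cost" not in card:
--     return False
--   tokens = card["mana_cost"][1:-1].split('}{')
--   colours = ["W", "U", "B", "R", "G"]
--   check = ['B/G', 'B/R', 'G/U', 'G/W', 'R/G', 'R/W', 'U/B', 'U/R', 'W/B', 'W/U']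
--   if any(t in colours for t in tokens):
--     return False
--   duals = {t for t in tokens if t in check}
--   return len(duals) == 1
-- ===== Notes on version B (the rewrite author's own statement) =====
-- stated objective: simpler
-- what changed: Replaced A's current/hasone state machine with a collect-then-evaluate check: return False if any pure colour token occurs, otherwise build the set of dual-colour tokens and test that it has exactly one element.
import Mathlib
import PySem

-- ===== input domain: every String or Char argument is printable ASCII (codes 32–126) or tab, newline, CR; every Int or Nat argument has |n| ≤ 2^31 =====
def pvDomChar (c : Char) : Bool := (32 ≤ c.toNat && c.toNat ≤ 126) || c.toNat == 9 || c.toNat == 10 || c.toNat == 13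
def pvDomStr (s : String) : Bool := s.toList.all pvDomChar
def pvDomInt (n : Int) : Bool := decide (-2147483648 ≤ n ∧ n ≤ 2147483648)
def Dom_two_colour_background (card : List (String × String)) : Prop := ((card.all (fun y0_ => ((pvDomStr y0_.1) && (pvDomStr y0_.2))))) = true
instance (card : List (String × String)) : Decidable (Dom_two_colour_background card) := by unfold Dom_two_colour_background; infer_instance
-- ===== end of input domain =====

-- B replaces A's current/hasone state machine by a collect-then-evaluate check on the set
-- of dual-colour tokens (objective: simpler). Return values only; neither program mutates.

def pvColours : List String := ["W", "U", "B", "R", "G"]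
def pvCheck : List String :=
  ["B/G", "B/R", "G/U", "G/W", "R/G", "R/W", "U/B", "U/R", "W/B", "W/U"]

-- ===== PORT A =====
-- A's 'for c in l' loop with state (current, hasone) and early returns.
def pvALoop : List String → String → Bool → Bool
  | [], _, hasone => hasone
  | c :: rest, current, hasone =>
    if pvColours.contains c then false
    else if pvCheck.contains c then
      if current != c && hasone then false
      else pvALoop rest c true
    else pvALoop rest current hasone

def two_colour_background (card : List (String × String)) : Bool :=
  match PySem.Dict.get? (PySem.Dict.mk card) "mana_cost" with
  | none => false        -- "mana_cost" not in card
  | some cost =>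
    -- l = cost[1:-1]; l = l.split('}{')   (sep nonempty, so split? is always some)
    let l := (PySem.Str.split? (PySem.Str.slice cost (some 1) (some (-1))) "}{").getD []
    pvALoop l "" false

-- ===== PORT B =====
def two_colour_background_alt (card : List (String × String)) : Bool :=
  match PySem.Dict.get? (PySem.Dict.mk card) "mana_cost" with
  | none => false
  | some cost =>
    let tokens := (PySem.Str.split? (PySem.Str.slice cost (some 1) (some (-1))) "}{").getD []
    if tokens.any (fun t => pvColours.contains t) then false
    else
      -- duals = {t for t in tokens if t in check}
      let duals : PySem.Set String := PySem.Set.ofList (tokens.filter (fun t => pvCheck.contains t))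
      PySem.Set.len duals == 1

-- ===== PRECONDITION & SPEC =====
def Spec_two_colour_background (card : List (String × String)) (out : Bool) : Prop := out = two_colour_background_alt card
instance (card : List (String × String)) (out : Bool) : Decidable (Spec_two_colour_background card out) := by unfold Spec_two_colour_background; infer_instance

-- ===== CLAIM (what is proved, stated in full; the proofs are below) =====
def Claim_equal_two_colour_background : Prop := ∀ (card : List (String × String)), Dom_two_colour_background card → Spec_two_colour_background card (two_colour_background card)

-- ===== LEMMAS AND PROOFS =====

-- growing a Set never shrinks it
theorem pvSet_foldl_add_le (es : List String) (s : PySem.Set String) :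
    s.length ≤ (es.foldl PySem.Set.add s).length := by
  induction es generalizing s with
  | nil => simp
  | cons e es ih =>
    refine le_trans ?_ (ih (PySem.Set.add s e))
    simp [PySem.Set.add]
    split <;> simp

-- the set {d} ∪ ds has one element iff every element of ds is d
theorem pvSet_len_one (d : String) (ds : List String) :
    ((((ds.foldl PySem.Set.add [d]).length : Int)) == 1) = ds.all (· == d) := by
  induction ds with
  | nil => simp
  | cons e es ih =>
    by_cases h : e = d
    · subst h
      simpa [PySem.Set.add, PySem.Set.contains] using ih
    · have h2 : PySem.Set.add [d] e = [d, e] := by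
        simp [PySem.Set.add, PySem.Set.contains, h]
      have hle := pvSet_foldl_add_le es [d, e]
      simp only [List.foldl_cons, h2, List.all_cons]
      have hne : (((es.foldl PySem.Set.add [d, e]).length : Int) == 1) = false := by
        simp at hle ⊢; omega
      simp [hne, h]

-- A's loop after the first dual symbol (hasone = true, current = cur)
theorem pvALoop_true (l : List String) (cur : String) :
    pvALoop l cur true = (!l.any (fun t => pvColours.contains t)
      && (l.filter (fun t => pvCheck.contains t)).all (· == cur)) := by
  induction l generalizing cur with
  | nil => simp [pvALoop]
  | cons c rest ih =>
    by_cases hcol : c ∈ pvColours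
    · simp [pvALoop, hcol]
    · by_cases hchk : c ∈ pvCheck
      · by_cases hc : cur = c
        · subst hc
          simp [pvALoop, hcol, hchk, ih]
        · simp [pvALoop, hcol, hchk, hc, Ne.symm hc]
      · simp [pvALoop, hcol, hchk, ih]

-- A's loop from the initial state equals B's collect-then-evaluate check
theorem pvALoop_eq (l : List String) :
    pvALoop l "" false =
      (if l.any (fun t => pvColours.contains t) then false
       else PySem.Set.len (PySem.Set.ofList (l.filter (fun t => pvCheck.contains t))) == 1) := by
  induction l with
  | nil => simp [pvALoop, PySem.Set.ofList, PySem.Set.len]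
  | cons c rest ih =>
    by_cases hcol : c ∈ pvColours
    · simp [pvALoop, hcol]
    · by_cases hchk : c ∈ pvCheck
      · have hne : c ≠ "" := by
          revert hchk; simp [pvCheck]; rintro (h|h|h|h|h|h|h|h|h|h) <;> simp [h]
        rw [show pvALoop (c :: rest) "" false = pvALoop rest c true by
              simp [pvALoop, hcol, hchk]]
        rw [pvALoop_true]
        by_cases hany : rest.any (fun t => pvColours.contains t)
        · have h1 : (rest.any fun t => pvColours.contains t) = true := by simpa using hany
          simp only [h1, List.any_cons, Bool.or_true, Bool.not_true, Bool.false_and]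
          rfl
        · have h0 : (rest.any fun t => pvColours.contains t) = false := by simpa using hany
          have hc0 : pvColours.contains c = false := by simpa using hcol
          have hk1 : pvCheck.contains c = true := by simpa using hchk
          have hadd : PySem.Set.add PySem.Set.empty c = [c] := rfl
          simp only [List.any_cons, h0, hc0, Bool.or_false, Bool.false_eq_true, if_false,
            List.filter_cons, hk1, if_true, PySem.Set.ofList, PySem.Set.len, List.foldl_cons,
            hadd, pvSet_len_one, Bool.not_false, Bool.true_and]
      · simp only [pvALoop, List.contains_eq_mem, hcol, decide_false, Bool.false_eq_true,
          if_false, hchk, ih, List.any_cons, List.filter_cons, Bool.false_or]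

-- ===== VERDICT (by name: the statement is the Claim_ definition above) =====
theorem two_colour_background_spec : Claim_equal_two_colour_background := by
  intro card _
  unfold Spec_two_colour_background two_colour_background two_colour_background_alt
  cases PySem.Dict.get? (PySem.Dict.mk card) "mana_cost" with
  | none => rfl
  | some cost =>
    dsimp only
    rw [pvALoop_eq]
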